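-- pv_equiv track=rewrite | github.com/RobertoSilvaDevFullStack/analise-presenca-digital | backend/scraper_modules/google_scraper.py | _categorize_pages
-- ===== SOURCE A (Python) =====
-- def _categorize_pages(pages):
--     """Categoriza tipos de páginas encontradas"""
--     categories = {
--         'home': 0,
--         'about': 0,
--         'services': 0,
--         'contact': 0,
--         'blog': 0,
--         'gallery': 0,
--         'booking': 0
--     }
--
--     for page in pages:
--         page_lower = page.lower()
--         if any(term in page_lower for term in ['home', 'inicio', 'index']):
--             categories['home'] += 1
--         elif any(term in page_lower for term in ['about', 'sobre', 'quem-somos']):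
--             categories['about'] += 1
--         elif any(term in page_lower for term in ['servicos', 'services', 'estrutura']):
--             categories['services'] += 1
--         elif any(term in page_lower for term in ['contato', 'contact']):
--             categories['contact'] += 1
--         elif any(term in page_lower for term in ['blog', 'noticias', 'artigos']):
--             categories['blog'] += 1
--         elif any(term in page_lower for term in ['galeria', 'gallery', 'fotos']):
--             categories['gallery'] += 1
--         elif any(term in page_lower for term in ['reserva', 'booking', 'book']):
--             categories['booking'] += 1
--
--     return categories
-- ===== SOURCE B (Python) =====
-- _CATEGORY_TERMS = [
--     ('home', ['home', 'inicio', 'index']),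
--     ('about', ['about', 'sobre', 'quem-somos']),
--     ('services', ['servicos', 'services', 'estrutura']),
--     ('contact', ['contato', 'contact']),
--     ('blog', ['blog', 'noticias', 'artigos']),
--     ('gallery', ['galeria', 'gallery', 'fotos']),
--     ('booking', ['reserva', 'booking', 'book']),
-- ]
--
-- def _categorize_pages(pages):
--     """Categoriza tipos de páginas encontradas"""
--     # Sieve: each category, in priority order, counts and removes its pages
--     # from a shrinking pool; what an earlier category claimed is never seen again.
--     pool = [p.lower() for p in pages]
--     counts = {}
--     for cat, terms in _CATEGORY_TERMS:
--         counts[cat] = sum(1 for p in pool if any(t in p for t in terms))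
--         pool = [p for p in pool if not any(t in p for t in terms)]
--     return counts
-- ===== Notes on version B (the rewrite author's own statement) =====
-- stated objective: alternative
-- what changed: Replaces A's per-page if/elif dispatch into a counts dict with a per-category sieve: each category in priority order counts its matches in a shrinking pool of lowercased pages and filters them out, so later categories never see pages an earlier one claimed.
import Mathlib
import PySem

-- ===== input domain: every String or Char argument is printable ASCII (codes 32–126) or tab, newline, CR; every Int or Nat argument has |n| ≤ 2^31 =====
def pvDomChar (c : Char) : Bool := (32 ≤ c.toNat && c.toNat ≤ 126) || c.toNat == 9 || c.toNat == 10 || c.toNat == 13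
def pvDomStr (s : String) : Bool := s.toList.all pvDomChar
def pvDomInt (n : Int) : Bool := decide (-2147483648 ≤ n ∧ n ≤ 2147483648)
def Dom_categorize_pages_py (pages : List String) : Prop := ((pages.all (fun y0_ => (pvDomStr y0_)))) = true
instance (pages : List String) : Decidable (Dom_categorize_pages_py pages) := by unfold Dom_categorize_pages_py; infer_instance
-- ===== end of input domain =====

-- B replaces A's per-page if/elif dispatch with a per-category sieve over a shrinking
-- pool of lowercased pages (alternative decomposition, same cost); equivalence of the
-- return value is proved below.

-- ===== PORT A =====
-- one iteration of A's for-loop: the if/elif chain over the lowercased page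
def pvAStep (d : PySem.Dict String Int) (page : String) : PySem.Dict String Int :=
  let pl := PySem.Str.lower page
  if ["home", "inicio", "index"].any (fun t => PySem.Str.isIn t pl) then
    d.modify "home" 0 (· + 1)
  else if ["about", "sobre", "quem-somos"].any (fun t => PySem.Str.isIn t pl) then
    d.modify "about" 0 (· + 1)
  else if ["servicos", "services", "estrutura"].any (fun t => PySem.Str.isIn t pl) then
    d.modify "services" 0 (· + 1)
  else if ["contato", "contact"].any (fun t => PySem.Str.isIn t pl) then
    d.modify "contact" 0 (· + 1)
  else if ["blog", "noticias", "artigos"].any (fun t => PySem.Str.isIn t pl) then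
    d.modify "blog" 0 (· + 1)
  else if ["galeria", "gallery", "fotos"].any (fun t => PySem.Str.isIn t pl) then
    d.modify "gallery" 0 (· + 1)
  else if ["reserva", "booking", "book"].any (fun t => PySem.Str.isIn t pl) then
    d.modify "booking" 0 (· + 1)
  else d

def categorize_pages_py (pages : List String) : List (String × Int) :=
  let categories : PySem.Dict String Int :=
    PySem.Dict.mk [("home", 0), ("about", 0), ("services", 0), ("contact", 0),
                   ("blog", 0), ("gallery", 0), ("booking", 0)]
  (pages.foldl pvAStep categories).items

-- ===== PORT B =====
-- the ordered (category, terms) table, in priority order (module constant in Source B)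
def pvTable : List (String × List String) :=
  [("home", ["home", "inicio", "index"]),
   ("about", ["about", "sobre", "quem-somos"]),
   ("services", ["servicos", "services", "estrutura"]),
   ("contact", ["contato", "contact"]),
   ("blog", ["blog", "noticias", "artigos"]),
   ("gallery", ["galeria", "gallery", "fotos"]),
   ("booking", ["reserva", "booking", "book"])]

-- 'any(t in p for t in terms)'
def pvMatch (terms : List String) (p : String) : Bool :=
  terms.any (fun t => PySem.Str.isIn t p)

-- B's loop body over the table: record the count, shrink the pool
def pvBStep (s : PySem.Dict String Int × List String) (ct : String × List String) :
    PySem.Dict String Int × List String :=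
  (s.1.insert ct.1 ((s.2.countP (pvMatch ct.2) : Nat) : Int),
   s.2.filter (fun p => !(pvMatch ct.2 p)))

def categorize_pages_py_alt (pages : List String) : List (String × Int) :=
  let pool := pages.map PySem.Str.lower
  (pvTable.foldl pvBStep (PySem.Dict.empty, pool)).1.items

-- ===== PRECONDITION & SPEC =====
def Spec_categorize_pages_py (pages : List String) (out : List (String × Int)) : Prop := out = categorize_pages_py_alt pages
instance (pages : List String) (out : List (String × Int)) : Decidable (Spec_categorize_pages_py pages out) := by unfold Spec_categorize_pages_py; infer_instance

-- ===== CLAIM (what is proved, stated in full; the proofs are below) =====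
def Claim_equal_categorize_pages_py : Prop := ∀ (pages : List String), Dom_categorize_pages_py pages → Spec_categorize_pages_py pages (categorize_pages_py pages)

-- ===== LEMMAS AND PROOFS =====

-- the seven branch conditions of A, as predicates on the (lowercased) page
def pvM1 (p : String) : Bool := pvMatch ["home", "inicio", "index"] p
def pvM2 (p : String) : Bool := pvMatch ["about", "sobre", "quem-somos"] p
def pvM3 (p : String) : Bool := pvMatch ["servicos", "services", "estrutura"] p
def pvM4 (p : String) : Bool := pvMatch ["contato", "contact"] p
def pvM5 (p : String) : Bool := pvMatch ["blog", "noticias", "artigos"] p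
def pvM6 (p : String) : Bool := pvMatch ["galeria", "gallery", "fotos"] p
def pvM7 (p : String) : Bool := pvMatch ["reserva", "booking", "book"] p

-- "first category that matches is i": the predicate A's branch i fires on
def pvP1 (p : String) : Bool := pvM1 p
def pvP2 (p : String) : Bool := !pvM1 p && pvM2 p
def pvP3 (p : String) : Bool := !pvM1 p && (!pvM2 p && pvM3 p)
def pvP4 (p : String) : Bool := !pvM1 p && (!pvM2 p && (!pvM3 p && pvM4 p))
def pvP5 (p : String) : Bool := !pvM1 p && (!pvM2 p && (!pvM3 p && (!pvM4 p && pvM5 p)))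
def pvP6 (p : String) : Bool := !pvM1 p && (!pvM2 p && (!pvM3 p && (!pvM4 p && (!pvM5 p && pvM6 p))))
def pvP7 (p : String) : Bool := !pvM1 p && (!pvM2 p && (!pvM3 p && (!pvM4 p && (!pvM5 p && (!pvM6 p && pvM7 p)))))

-- the if/elif chain with abstract branch conditions: result as one literal dict
theorem pvChainStep (a b c d e f g : Int) (q1 q2 q3 q4 q5 q6 q7 : Bool)
    (dd : PySem.Dict String Int)
    (hd : dd = PySem.Dict.mk [("home", a), ("about", b), ("services", c),
        ("contact", d), ("blog", e), ("gallery", f), ("booking", g)]) :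
    (if q1 then dd.modify "home" 0 (· + 1)
     else if q2 then dd.modify "about" 0 (· + 1)
     else if q3 then dd.modify "services" 0 (· + 1)
     else if q4 then dd.modify "contact" 0 (· + 1)
     else if q5 then dd.modify "blog" 0 (· + 1)
     else if q6 then dd.modify "gallery" 0 (· + 1)
     else if q7 then dd.modify "booking" 0 (· + 1)
     else dd)
    = PySem.Dict.mk [("home", a + if q1 then 1 else 0),
        ("about", b + if !q1 && q2 then 1 else 0),
        ("services", c + if !q1 && (!q2 && q3) then 1 else 0),
        ("contact", d + if !q1 && (!q2 && (!q3 && q4)) then 1 else 0),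
        ("blog", e + if !q1 && (!q2 && (!q3 && (!q4 && q5))) then 1 else 0),
        ("gallery", f + if !q1 && (!q2 && (!q3 && (!q4 && (!q5 && q6)))) then 1 else 0),
        ("booking", g + if !q1 && (!q2 && (!q3 && (!q4 && (!q5 && (!q6 && q7))))) then 1 else 0)] := by
  subst hd
  cases q1 <;> cases q2 <;> cases q3 <;> cases q4 <;> cases q5 <;> cases q6 <;> cases q7 <;>
    simp [PySem.Dict.modify, PySem.Dict.insert, PySem.Dict.getD, PySem.Dict.get?]

-- A's whole loop, characterised: each key ends at its start value plus the number of
-- pages whose first matching category is that key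
theorem pvA_items (L : List String) : ∀ (a b c d e f g : Int),
    ((L.foldl pvAStep (PySem.Dict.mk [("home", a), ("about", b), ("services", c),
        ("contact", d), ("blog", e), ("gallery", f), ("booking", g)])).items
      = [("home", a + (L.countP (fun p => pvP1 (PySem.Str.lower p)) : Nat)),
         ("about", b + (L.countP (fun p => pvP2 (PySem.Str.lower p)) : Nat)),
         ("services", c + (L.countP (fun p => pvP3 (PySem.Str.lower p)) : Nat)),
         ("contact", d + (L.countP (fun p => pvP4 (PySem.Str.lower p)) : Nat)),
         ("blog", e + (L.countP (fun p => pvP5 (PySem.Str.lower p)) : Nat)),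
         ("gallery", f + (L.countP (fun p => pvP6 (PySem.Str.lower p)) : Nat)),
         ("booking", g + (L.countP (fun p => pvP7 (PySem.Str.lower p)) : Nat))]) := by
  induction L with
  | nil => intro a b c d e f g; simp
  | cons x xs ih =>
    intro a b c d e f g
    simp only [List.foldl_cons, List.countP_cons]
    have hstep := pvChainStep a b c d e f g
      (pvM1 (PySem.Str.lower x)) (pvM2 (PySem.Str.lower x)) (pvM3 (PySem.Str.lower x))
      (pvM4 (PySem.Str.lower x)) (pvM5 (PySem.Str.lower x)) (pvM6 (PySem.Str.lower x))
      (pvM7 (PySem.Str.lower x)) _ rfl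
    have hstep' : pvAStep (PySem.Dict.mk [("home", a), ("about", b), ("services", c),
        ("contact", d), ("blog", e), ("gallery", f), ("booking", g)]) x
      = PySem.Dict.mk [("home", a + if pvP1 (PySem.Str.lower x) then 1 else 0),
          ("about", b + if pvP2 (PySem.Str.lower x) then 1 else 0),
          ("services", c + if pvP3 (PySem.Str.lower x) then 1 else 0),
          ("contact", d + if pvP4 (PySem.Str.lower x) then 1 else 0),
          ("blog", e + if pvP5 (PySem.Str.lower x) then 1 else 0),
          ("gallery", f + if pvP6 (PySem.Str.lower x) then 1 else 0),
          ("booking", g + if pvP7 (PySem.Str.lower x) then 1 else 0)] := by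
      simpa only [pvAStep, pvP1, pvP2, pvP3, pvP4, pvP5, pvP6, pvP7,
        pvM1, pvM2, pvM3, pvM4, pvM5, pvM6, pvM7, pvMatch] using hstep
    rw [hstep', ih]
    simp only [List.cons.injEq, Prod.mk.injEq, true_and, and_true]
    refine ⟨?_, ?_, ?_, ?_, ?_, ?_, ?_⟩ <;> (split <;> push_cast <;> ring)

-- countP only depends on the pointwise values of its predicate
theorem pvCountP_ext {α : Type} (p q : α → Bool) (h : ∀ x, p x = q x) (l : List α) :
    l.countP p = l.countP q := by
  induction l with
  | nil => rfl
  | cons x xs ih => simp [List.countP_cons, h x, ih]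

-- ===== VERDICT (by name: the statement is the Claim_ definition above) =====
theorem categorize_pages_py_spec : Claim_equal_categorize_pages_py := by
  intro pages _
  unfold Spec_categorize_pages_py categorize_pages_py categorize_pages_py_alt
  rw [pvA_items]
  simp only [pvTable, pvBStep, List.foldl_cons, List.foldl_nil]
  simp only [List.countP_filter, List.filter_filter, List.countP_map, Function.comp_def,
    pvP1, pvP2, pvP3, pvP4, pvP5, pvP6, pvP7, pvM1, pvM2, pvM3, pvM4, pvM5, pvM6, pvM7]
  simp only [zero_add]
  simp [PySem.Dict.insert, PySem.Dict.empty, PySem.Dict.contains]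
  refine ⟨?_, ?_, ?_, ?_, ?_, ?_⟩ <;>
    (apply pvCountP_ext; intro x; ac_rfl)
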